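-- pv_equiv track=rewrite | github.com/dorian68/alphalens_trade_generation | notebook/playground/mc_runner.py | _split_paths
-- ===== SOURCE A (Python) =====
-- from typing import Any, Dict, Iterable, List, Optional, Sequence, Tuple, Union
--
-- def _split_paths(total_paths: int, batch_paths: Optional[int]) -> List[int]:
--     if batch_paths is None or batch_paths <= 0 or batch_paths >= total_paths:
--         return [int(total_paths)]
--     batches: List[int] = []
--     remaining = int(total_paths)
--     while remaining > 0:
--         count = min(batch_paths, remaining)
--         batches.append(int(count))
--         remaining -= count
--     return batches
-- ===== SOURCE B (Python) =====
-- from typing import List, Optional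
--
-- def _split_paths(total_paths: int, batch_paths: Optional[int]) -> List[int]:
--     if batch_paths is None or batch_paths <= 0 or batch_paths >= total_paths:
--         return [int(total_paths)]
--     q, r = divmod(int(total_paths), batch_paths)
--     return [batch_paths] * q + ([r] if r else [])
-- ===== Notes on version B (the rewrite author's own statement) =====
-- stated objective: simpler
-- what changed: Replaces the repeated-subtraction while-loop with a closed-form divmod: q full batches plus the remainder chunk when nonzero.
import Mathlib
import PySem

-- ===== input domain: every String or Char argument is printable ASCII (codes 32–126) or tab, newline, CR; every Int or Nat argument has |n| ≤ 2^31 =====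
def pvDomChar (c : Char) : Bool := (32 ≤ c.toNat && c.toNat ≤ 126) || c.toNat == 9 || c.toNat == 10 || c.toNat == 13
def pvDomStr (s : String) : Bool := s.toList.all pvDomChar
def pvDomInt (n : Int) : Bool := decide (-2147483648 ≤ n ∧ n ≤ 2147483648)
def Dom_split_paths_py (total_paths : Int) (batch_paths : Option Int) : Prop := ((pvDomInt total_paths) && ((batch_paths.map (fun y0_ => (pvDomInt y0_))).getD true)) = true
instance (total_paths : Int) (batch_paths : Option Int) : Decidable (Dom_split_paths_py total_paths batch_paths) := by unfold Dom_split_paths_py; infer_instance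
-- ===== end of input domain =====

-- B replaces A's repeated-subtraction while-loop by a closed-form divmod chunk list (objective: simpler).


-- ===== PORT A =====
-- the 'while remaining > 0' loop; only reached with 0 < b (the guard), which gives termination
def splitLoopA (b : Int) (hb : 0 < b) (remaining : Int) : List Int :=
  if _h : remaining > 0 then
    (min b remaining) :: splitLoopA b hb (remaining - min b remaining)
  else []
termination_by remaining.toNat
decreasing_by
  simp only [min_def]; split <;> omega

def split_paths_py (total_paths : Int) (batch_paths : Option Int) : List Int :=
  match batch_paths with
  | none => [total_paths]
  | some b =>
    if hb : b ≤ 0 ∨ b ≥ total_paths then [total_paths]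
    else splitLoopA b (by omega) total_paths

-- ===== PORT B =====
def split_paths_py_alt (total_paths : Int) (batch_paths : Option Int) : List Int :=
  match batch_paths with
  | none => [total_paths]
  | some b =>
    if b ≤ 0 ∨ b ≥ total_paths then [total_paths]
    else
      let q := PySem.Int.floordiv total_paths b
      let r := PySem.Int.mod total_paths b
      List.replicate q.toNat b ++ (if r ≠ 0 then [r] else [])

-- ===== PRECONDITION & SPEC =====
def Spec_split_paths_py (total_paths : Int) (batch_paths : Option Int) (out : List Int) : Prop := out = split_paths_py_alt total_paths batch_paths
instance (total_paths : Int) (batch_paths : Option Int) (out : List Int) : Decidable (Spec_split_paths_py total_paths batch_paths out) := by unfold Spec_split_paths_py; infer_instance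

-- ===== CLAIM (what is proved, stated in full; the proofs are below) =====
def Claim_equal_split_paths_py : Prop := ∀ (total_paths : Int) (batch_paths : Option Int), Dom_split_paths_py total_paths batch_paths → Spec_split_paths_py total_paths batch_paths (split_paths_py total_paths batch_paths)

-- ===== LEMMAS AND PROOFS =====

-- loop characterisation: for nonnegative remaining, the loop produces q copies of b plus the remainder if nonzero
theorem splitLoopA_eq (b : Int) (hb : 0 < b) :
    ∀ r : Int, 0 ≤ r →
      splitLoopA b hb r =
        List.replicate (PySem.Int.floordiv r b).toNat b ++
          (if PySem.Int.mod r b ≠ 0 then [PySem.Int.mod r b] else []) := by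
  intro r hr
  induction hn : r.toNat using Nat.strong_induction_on generalizing r with
  | _ n ih =>
    rw [splitLoopA]
    rw [PySem.Int.floordiv_eq_ediv_of_pos hb, PySem.Int.mod_eq_emod_of_pos hb]
    by_cases hpos : r > 0
    · rcases lt_or_ge r b with hbr | hbr
      · -- last partial batch: count = r, remaining becomes 0
        have hmin : min b r = r := min_eq_right (le_of_lt hbr)
        simp only [hpos, hmin, sub_self]
        rw [splitLoopA]
        have hq : r / b = 0 := Int.ediv_eq_zero_of_lt hr hbr
        have hm : r % b = r := Int.emod_eq_of_lt hr hbr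
        simp [hq, hm]
        omega
      · -- full batch: count = b
        have hmin : min b r = b := min_eq_left hbr
        have hrec := ih (r - b).toNat (by omega) (r - b) (by omega) rfl
        rw [PySem.Int.floordiv_eq_ediv_of_pos hb, PySem.Int.mod_eq_emod_of_pos hb] at hrec
        simp only [hpos, hmin, hrec]
        have hq : r / b = (r - b) / b + 1 := by
          have h2 := Int.add_mul_ediv_right (r - b) 1 (by omega : b ≠ 0)
          rw [one_mul, sub_add_cancel] at h2; exact h2
        have hm : r % b = (r - b) % b := (Int.sub_emod_right r b).symm
        have hq0 : 0 ≤ (r - b) / b := Int.ediv_nonneg (by omega) (by omega)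
        rw [hq, hm, show ((r - b) / b + 1).toNat = ((r - b) / b).toNat + 1 by omega,
          List.replicate_succ]
        simp
    · -- remaining = 0
      have h0 : r = 0 := by omega
      subst h0
      simp

-- ===== VERDICT (by name: the statement is the Claim_ definition above) =====
theorem split_paths_py_spec : Claim_equal_split_paths_py := by
  intro total_paths batch_paths _
  unfold Spec_split_paths_py split_paths_py split_paths_py_alt
  match batch_paths with
  | none => rfl
  | some b =>
    by_cases hg : b ≤ 0 ∨ b ≥ total_paths
    · simp [hg]
    · simp only [hg, dif_neg, if_neg, not_false_iff]
      exact splitLoopA_eq b (by omega) total_paths (by omega)
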